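-- pv_equiv track=rewrite | github.com/yz4004/codeforce-python | copypaste/monotonic_queue.py | sliding_window_max_min
-- ===== SOURCE A (Python) =====
-- from collections import deque
--
-- def sliding_window_max_min(nums, k):
--     # 维护滑窗内最值 - 静态
--     # 1. 可以用RMQ/ST表静态查询
--     # 2. 单调队列
--     # https://leetcode.cn/problems/count-subarrays-with-cost-less-than-or-equal-to-k/
--
--     n = len(nums)
--     # 计算 (mx - mn) * (r-l+1) < k 的子数组数量. mx = max(nums[l,r])
--     # (mx - mn) * (r-l+1) 随着l靠近r - 单调减小
--     # 滑窗 + 维护窗口内最大最小值 - 单调队列维护滑窗内最值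
--
--     qmin = deque()
--     qmax = deque()
--     res = 0
--     j = 0
--     for i in range(n):
--         x = nums[i]
--         while qmin and qmin[-1][0] >= x:
--             qmin.pop()
--
--         while qmax and qmax[-1][0] <= x:
--             qmax.pop()
--
--         qmin.append((x, i))
--         qmax.append((x, i))
--
--         while j <= i and (qmax[0][0] - qmin[0][0]) * (i - j + 1) > k: # 非法左端点条件
--             if qmin[0][1] == j:
--                 qmin.popleft()
--             if qmax[0][1] == j:
--                 qmax.popleft()
--             j += 1
--
--         res += i - j + 1
--     return res
-- ===== SOURCE B (Python) =====
-- def sliding_window_max_min(nums, k):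
--     # For each right endpoint i, scan leftwards keeping a running max/min and
--     # count left endpoints while the window stays legal; the cost is monotone
--     # in the left endpoint, so we stop at the first illegal one.
--     res = 0
--     for i in range(len(nums)):
--         mx = mn = nums[i]
--         for l in range(i, -1, -1):
--             if nums[l] > mx:
--                 mx = nums[l]
--             if nums[l] < mn:
--                 mn = nums[l]
--             if (mx - mn) * (i - l + 1) > k:
--                 break
--             res += 1
--     return res
-- ===== Notes on version B (the rewrite author's own statement) =====
-- stated objective: simpler
-- what changed: Replaces A's two monotonic deques plus persistent sliding left pointer by an independent backward scan from each right endpoint that keeps a running max/min and stops at the first illegal left endpoint (valid thanks to the cost being monotone in the window).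
import Mathlib
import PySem

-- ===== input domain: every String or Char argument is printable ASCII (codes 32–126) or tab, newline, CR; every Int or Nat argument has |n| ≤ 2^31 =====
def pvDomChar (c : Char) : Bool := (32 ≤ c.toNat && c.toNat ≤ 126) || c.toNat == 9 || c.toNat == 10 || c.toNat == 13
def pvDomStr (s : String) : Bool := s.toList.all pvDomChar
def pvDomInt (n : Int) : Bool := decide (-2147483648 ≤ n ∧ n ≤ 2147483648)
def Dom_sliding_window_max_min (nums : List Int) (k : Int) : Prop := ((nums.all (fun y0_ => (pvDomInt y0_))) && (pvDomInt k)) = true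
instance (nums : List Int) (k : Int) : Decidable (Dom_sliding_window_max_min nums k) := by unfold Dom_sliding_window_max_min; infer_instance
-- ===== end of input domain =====

-- B replaces A's two monotonic deques and persistent two-pointer window by an
-- independent backward scan per right endpoint with a running max/min
-- (objective: simpler; not faster).

-- ===== PORT A =====
-- the inner `while j <= i and ...` loop: pops the deque fronts and advances j
def pvShrink (k : Int) (i : Nat) (fuel : Nat) (qmin qmax : List (Int × Nat)) (j : Nat) :
    List (Int × Nat) × List (Int × Nat) × Nat :=
  -- `qmax[0]` / `qmin[0]`: nonempty whenever j ≤ i (proved below); headD is only a totality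
  -- guard, as is fuel (the loop advances j toward i + 1, so fuel i + 1 ≥ i + 1 - j suffices)
  match fuel with
  | 0 => (qmin, qmax, j)
  | fuel + 1 =>
    if j ≤ i ∧ k < ((qmax.headD (0,0)).1 - (qmin.headD (0,0)).1) * ((i:Int) - (j:Int) + 1) then
      let qmin' := if (qmin.headD (0,0)).2 = j then qmin.tail else qmin
      let qmax' := if (qmax.headD (0,0)).2 = j then qmax.tail else qmax
      pvShrink k i fuel qmin' qmax' (j+1)
    else (qmin, qmax, j)

-- one iteration of A's `for i in range(n)` loop on state (qmin, qmax, res, j);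
-- the two `while ... pop()` back-pop loops are dropWhile from the back
def pvStepA (nums : List Int) (k : Int)
    (st : List (Int × Nat) × List (Int × Nat) × Int × Nat) (i : Nat) :
    List (Int × Nat) × List (Int × Nat) × Int × Nat :=
  let x := nums.getD i 0   -- nums[i], i ∈ range(n) is always in range
  let qmin1 := (st.1.reverse.dropWhile (fun e => x ≤ e.1)).reverse ++ [(x, i)]
  let qmax1 := (st.2.1.reverse.dropWhile (fun e => e.1 ≤ x)).reverse ++ [(x, i)]
  let r := pvShrink k i (i+1) qmin1 qmax1 st.2.2.2
  (r.1, r.2.1, st.2.2.1 + ((i:Int) - (r.2.2:Int) + 1), r.2.2)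

def sliding_window_max_min (nums : List Int) (k : Int) : Int :=
  ((List.range nums.length).foldl (pvStepA nums k) ([], [], 0, 0)).2.2.1

-- ===== PORT B =====
-- Source B's inner `for l in range(i, -1, -1)` loop with running mx/mn and break
def pvAltGo (nums : List Int) (k : Int) (i : Nat) (l : Nat) (mx mn res : Int) : Int :=
  let x := nums.getD l 0
  let mx := if x > mx then x else mx
  let mn := if x < mn then x else mn
  if k < (mx - mn) * ((i:Int) - (l:Int) + 1) then res
  else
    match l with
    | 0 => res + 1
    | l' + 1 => pvAltGo nums k i l' mx mn (res+1)

def sliding_window_max_min_alt (nums : List Int) (k : Int) : Int :=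
  (List.range nums.length).foldl
    (fun res i => pvAltGo nums k i i (nums.getD i 0) (nums.getD i 0) res) 0

-- ===== PRECONDITION & SPEC =====
def Spec_sliding_window_max_min (nums : List Int) (k : Int) (out : Int) : Prop := out = sliding_window_max_min_alt nums k
instance (nums : List Int) (k : Int) (out : Int) : Decidable (Spec_sliding_window_max_min nums k out) := by unfold Spec_sliding_window_max_min; infer_instance

-- ===== CLAIM (what is proved, stated in full; the proofs are below) =====
def Claim_equal_sliding_window_max_min : Prop := ∀ (nums : List Int) (k : Int), Dom_sliding_window_max_min nums k → Spec_sliding_window_max_min nums k (sliding_window_max_min nums k)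

-- ===== LEMMAS AND PROOFS =====

-- min of nums[b..i] (via getD; all indices used are in range in both ports)
def pvWMin (nums : List Int) (b i : Nat) : Int :=
  if b < i then min (nums.getD b 0) (pvWMin nums (b+1) i) else nums.getD b 0
termination_by i - b
decreasing_by omega

def pvWMax (nums : List Int) (b i : Nat) : Int :=
  if b < i then max (nums.getD b 0) (pvWMax nums (b+1) i) else nums.getD b 0
termination_by i - b
decreasing_by omega

-- cost of the window [l, i]
def pvCost (nums : List Int) (i l : Nat) : Int :=
  (pvWMax nums l i - pvWMin nums l i) * ((i:Int) - (l:Int) + 1)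

-- least legal left endpoint for right endpoint i (i+1 if none)
def pvJmin (nums : List Int) (k : Int) (i : Nat) : Nat :=
  Nat.find (p := fun l => l = i + 1 ∨ (l ≤ i ∧ pvCost nums i l ≤ k)) ⟨i + 1, Or.inl rfl⟩

-- invariant of A's qmin deque for window [b, i]: entries are (value, index),
-- indices increasing and ending at i, each value the window min from just
-- after the previous entry; an empty deque means the window is empty (b = i+1)
def pvDMin (nums : List Int) (i : Nat) : Nat → List (Int × Nat) → Prop
  | b, [] => b = i + 1
  | b, (v, p) :: rest =>
      b ≤ p ∧ p ≤ i ∧ v = nums.getD p 0 ∧ v = pvWMin nums b i ∧ pvDMin nums i (p+1) rest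

def pvDMax (nums : List Int) (i : Nat) : Nat → List (Int × Nat) → Prop
  | b, [] => b = i + 1
  | b, (v, p) :: rest =>
      b ≤ p ∧ p ≤ i ∧ v = nums.getD p 0 ∧ v = pvWMax nums b i ∧ pvDMax nums i (p+1) rest

-- state invariant of A's outer loop after m iterations
def pvGoodA (nums : List Int) (k : Int) (m : Nat)
    (st : List (Int × Nat) × List (Int × Nat) × Int × Nat) : Prop :=
  match m with
  | 0 => st = ([], [], 0, 0)
  | m' + 1 =>
      pvDMin nums m' st.2.2.2 st.1 ∧ pvDMax nums m' st.2.2.2 st.2.1 ∧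
      st.2.2.2 = pvJmin nums k m' ∧
      st.2.2.1 = ∑ t ∈ Finset.range (m' + 1), ((t : Int) - (pvJmin nums k t : Int) + 1)

----------------------------------------------------------------
-- window min/max basics
----------------------------------------------------------------

theorem pvWMin_last (nums : List Int) (i : Nat) : pvWMin nums i i = nums.getD i 0 := by
  rw [pvWMin]; simp

theorem pvWMax_last (nums : List Int) (i : Nat) : pvWMax nums i i = nums.getD i 0 := by
  rw [pvWMax]; simp

theorem pvWMin_step (nums : List Int) {b i : Nat} (h : b < i) :
    pvWMin nums b i = min (nums.getD b 0) (pvWMin nums (b+1) i) := by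
  rw [pvWMin]; simp [h]

theorem pvWMax_step (nums : List Int) {b i : Nat} (h : b < i) :
    pvWMax nums b i = max (nums.getD b 0) (pvWMax nums (b+1) i) := by
  rw [pvWMax]; simp [h]

theorem pvWMin_snoc (nums : List Int) : ∀ {b i : Nat}, b ≤ i →
    pvWMin nums b (i+1) = min (pvWMin nums b i) (nums.getD (i+1) 0) := by
  intro b i hbi
  induction hd : i - b generalizing b with
  | zero =>
      have hb : b = i := by omega
      subst hb
      rw [pvWMin_step nums (by omega), pvWMin_last, pvWMin_last]
  | succ d ih =>
      have hlt : b < i := by omega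
      rw [pvWMin_step nums (show b < i + 1 by omega), pvWMin_step nums hlt,
        ih (by omega) (by omega), min_assoc]

theorem pvWMax_snoc (nums : List Int) : ∀ {b i : Nat}, b ≤ i →
    pvWMax nums b (i+1) = max (pvWMax nums b i) (nums.getD (i+1) 0) := by
  intro b i hbi
  induction hd : i - b generalizing b with
  | zero =>
      have hb : b = i := by omega
      subst hb
      rw [pvWMax_step nums (by omega), pvWMax_last, pvWMax_last]
  | succ d ih =>
      have hlt : b < i := by omega
      rw [pvWMax_step nums (show b < i + 1 by omega), pvWMax_step nums hlt,
        ih (by omega) (by omega), max_assoc]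

theorem pvWMin_le_get (nums : List Int) : ∀ {b p i : Nat}, b ≤ p → p ≤ i →
    pvWMin nums b i ≤ nums.getD p 0 := by
  intro b p i hbp hpi
  induction hd : i - b generalizing b with
  | zero =>
      have : b = i := by omega
      subst this
      have : p = b := by omega
      subst this
      rw [pvWMin_last]
  | succ d ih =>
      have hlt : b < i := by omega
      rw [pvWMin_step nums hlt]
      rcases Nat.eq_or_lt_of_le hbp with h | h
      · subst h; exact min_le_left _ _
      · exact le_trans (min_le_right _ _) (ih h (by omega))

theorem pvGet_le_wMax (nums : List Int) : ∀ {b p i : Nat}, b ≤ p → p ≤ i →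
    nums.getD p 0 ≤ pvWMax nums b i := by
  intro b p i hbp hpi
  induction hd : i - b generalizing b with
  | zero =>
      have : b = i := by omega
      subst this
      have : p = b := by omega
      subst this
      rw [pvWMax_last]
  | succ d ih =>
      have hlt : b < i := by omega
      rw [pvWMax_step nums hlt]
      rcases Nat.eq_or_lt_of_le hbp with h | h
      · subst h; exact le_max_left _ _
      · exact le_trans (ih h (by omega)) (le_max_right _ _)

theorem pvWMin_mono (nums : List Int) : ∀ {b b' i : Nat}, b ≤ b' → b' ≤ i →
    pvWMin nums b i ≤ pvWMin nums b' i := by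
  intro b b' i hbb hbi
  induction hd : b' - b generalizing b with
  | zero =>
      have : b = b' := by omega
      subst this; exact le_refl _
  | succ d ih =>
      have hlt : b < i := by omega
      rw [pvWMin_step nums hlt]
      exact le_trans (min_le_right _ _) (ih (by omega) (by omega))

theorem pvWMax_mono (nums : List Int) : ∀ {b b' i : Nat}, b ≤ b' → b' ≤ i →
    pvWMax nums b' i ≤ pvWMax nums b i := by
  intro b b' i hbb hbi
  induction hd : b' - b generalizing b with
  | zero =>
      have : b = b' := by omega
      subst this; exact le_refl _
  | succ d ih =>
      have hlt : b < i := by omega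
      rw [pvWMax_step nums hlt]
      exact le_trans (ih (by omega) (by omega)) (le_max_right _ _)

theorem pvWMin_le_wMax (nums : List Int) {b i : Nat} (h : b ≤ i) :
    pvWMin nums b i ≤ pvWMax nums b i :=
  le_trans (pvWMin_le_get nums (le_refl b) h) (pvGet_le_wMax nums (le_refl b) h)

----------------------------------------------------------------
-- cost monotonicity
----------------------------------------------------------------

theorem pvCost_anti_l (nums : List Int) {b b' i : Nat} (hbb : b ≤ b') (hbi : b' ≤ i) :
    pvCost nums i b' ≤ pvCost nums i b := by
  unfold pvCost
  have h1 : pvWMax nums b' i - pvWMin nums b' i ≤ pvWMax nums b i - pvWMin nums b i := by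
    have := pvWMax_mono nums hbb hbi
    have := pvWMin_mono nums hbb hbi
    omega
  have h2 : ((i:Int) - (b':Int) + 1) ≤ ((i:Int) - (b:Int) + 1) := by
    have := Nat.cast_le (α := Int) |>.mpr hbb
    omega
  have h3 : (0:Int) ≤ (i:Int) - (b':Int) + 1 := by
    have := Nat.cast_le (α := Int) |>.mpr hbi
    omega
  have h4 : (0:Int) ≤ pvWMax nums b i - pvWMin nums b i := by
    have := pvWMin_le_wMax nums (le_trans hbb hbi)
    have := pvWMin_mono nums hbb hbi
    have := pvWMax_mono nums hbb hbi
    omega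
  exact mul_le_mul h1 h2 h3 h4

theorem pvCost_mono_r (nums : List Int) {l i : Nat} (hli : l ≤ i) :
    pvCost nums i l ≤ pvCost nums (i+1) l := by
  unfold pvCost
  rw [pvWMax_snoc nums hli, pvWMin_snoc nums hli]
  have h1 : pvWMax nums l i - pvWMin nums l i ≤
      max (pvWMax nums l i) (nums.getD (i+1) 0) - min (pvWMin nums l i) (nums.getD (i+1) 0) := by
    have := le_max_left (pvWMax nums l i) (nums.getD (i+1) 0)
    have := min_le_left (pvWMin nums l i) (nums.getD (i+1) 0)
    omega
  have h2 : ((i:Int) - (l:Int) + 1) ≤ ((i:Int) + 1 - (l:Int) + 1) := by omega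
  have h3 : (0:Int) ≤ (i:Int) - (l:Int) + 1 := by
    have := Nat.cast_le (α := Int) |>.mpr hli
    omega
  have h4 : (0:Int) ≤
      max (pvWMax nums l i) (nums.getD (i+1) 0) - min (pvWMin nums l i) (nums.getD (i+1) 0) := by
    have := pvWMin_le_wMax nums hli
    have := le_max_left (pvWMax nums l i) (nums.getD (i+1) 0)
    have := min_le_left (pvWMin nums l i) (nums.getD (i+1) 0)
    omega
  have := mul_le_mul h1 h2 h3 h4
  push_cast
  push_cast at this
  linarith

----------------------------------------------------------------
-- pvJmin characterisation
----------------------------------------------------------------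

theorem pvJmin_le (nums : List Int) (k : Int) (i : Nat) : pvJmin nums k i ≤ i + 1 :=
  Nat.find_min' _ (Or.inl rfl)

theorem pvJmin_valid (nums : List Int) (k : Int) {i : Nat}
    (h : pvJmin nums k i ≤ i) : pvCost nums i (pvJmin nums k i) ≤ k := by
  unfold pvJmin at h ⊢
  have := Nat.find_spec (p := fun l => l = i + 1 ∨ (l ≤ i ∧ pvCost nums i l ≤ k))
    ⟨i + 1, Or.inl rfl⟩
  rcases this with h1 | h2
  · omega
  · exact h2.2

theorem pvValid_iff (nums : List Int) (k : Int) {i l : Nat} (hli : l ≤ i) :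
    pvCost nums i l ≤ k ↔ pvJmin nums k i ≤ l := by
  constructor
  · intro h
    exact Nat.find_min' _ (Or.inr ⟨hli, h⟩)
  · intro h
    exact le_trans (pvCost_anti_l nums h hli) (pvJmin_valid nums k (le_trans h hli))

theorem pvJmin_mono (nums : List Int) (k : Int) (i : Nat) :
    pvJmin nums k i ≤ pvJmin nums k (i+1) := by
  by_cases h : pvJmin nums k (i+1) ≤ i
  · have hv : pvCost nums (i+1) (pvJmin nums k (i+1)) ≤ k :=
      pvJmin_valid nums k (by omega)
    have : pvCost nums i (pvJmin nums k (i+1)) ≤ k :=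
      le_trans (pvCost_mono_r nums h) hv
    exact (pvValid_iff nums k h).mp this
  · have := pvJmin_le nums k i
    omega

----------------------------------------------------------------
-- B: the backward scan counts i - pvJmin + 1
----------------------------------------------------------------

theorem pvIteMax (x m : Int) : (if x > m then x else m) = max m x := by
  rw [max_def]; split_ifs <;> omega

theorem pvIteMin (x m : Int) : (if x < m then x else m) = min m x := by
  rw [min_def]; split_ifs <;> omega

theorem pvAltGo_eq (nums : List Int) (k : Int) (i : Nat) :
    ∀ (l : Nat) (mx mn res : Int), l ≤ i →
      max mx (nums.getD l 0) = pvWMax nums l i →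
      min mn (nums.getD l 0) = pvWMin nums l i →
      pvAltGo nums k i l mx mn res =
        res + max 0 ((l : Int) - (pvJmin nums k i : Int) + 1) := by
  intro l
  induction l with
  | zero =>
      intro mx mn res hli hmx hmn
      rw [pvAltGo]
      simp only [pvIteMax, pvIteMin, hmx, hmn]
      have hj1 : pvJmin nums k i ≤ i + 1 := pvJmin_le nums k i
      by_cases hc : k < (pvWMax nums 0 i - pvWMin nums 0 i) * ((i:Int) - ((0:Nat):Int) + 1)
      · rw [if_pos hc]
        have hcost : k < pvCost nums i 0 := by
          unfold pvCost; simpa using hc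
        have hj : ¬ pvJmin nums k i ≤ 0 := fun hle =>
          absurd ((pvValid_iff nums k (Nat.zero_le i)).mpr hle) (not_le.mpr hcost)
        have hj' : 1 ≤ ((pvJmin nums k i : Nat) : Int) := by exact_mod_cast Nat.one_le_iff_ne_zero.mpr (by omega)
        rw [max_eq_left (by push_cast; omega)]
        omega
      · rw [if_neg hc]
        have hcost : pvCost nums i 0 ≤ k := by
          unfold pvCost; push_cast at hc ⊢; omega
        have hj : pvJmin nums k i = 0 :=
          Nat.le_zero.mp ((pvValid_iff nums k (Nat.zero_le i)).mp hcost)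
        show res + 1 = _
        rw [hj]
        norm_num
  | succ l ih =>
      intro mx mn res hli hmx hmn
      rw [pvAltGo]
      simp only [pvIteMax, pvIteMin, hmx, hmn]
      have hj1 : pvJmin nums k i ≤ i + 1 := pvJmin_le nums k i
      by_cases hc : k < (pvWMax nums (l+1) i - pvWMin nums (l+1) i) * ((i:Int) - ((l+1:Nat):Int) + 1)
      · rw [if_pos hc]
        have hcost : k < pvCost nums i (l+1) := by
          unfold pvCost; push_cast at hc ⊢; omega
        have hj : ¬ pvJmin nums k i ≤ l + 1 := fun hle =>
          absurd ((pvValid_iff nums k hli).mpr hle) (not_le.mpr hcost)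
        have hj' : ((l:Nat):Int) + 1 + 1 ≤ ((pvJmin nums k i : Nat) : Int) := by exact_mod_cast (by omega : l + 2 ≤ pvJmin nums k i)
        rw [max_eq_left (by push_cast; omega)]
        omega
      · rw [if_neg hc]
        show pvAltGo nums k i l (pvWMax nums (l+1) i) (pvWMin nums (l+1) i) (res + 1) = _
        have hli' : l ≤ i := by omega
        have hlt : l < i := by omega
        have hmx' : max (pvWMax nums (l+1) i) (nums.getD l 0) = pvWMax nums l i := by
          rw [pvWMax_step nums hlt, max_comm]
        have hmn' : min (pvWMin nums (l+1) i) (nums.getD l 0) = pvWMin nums l i := by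
          rw [pvWMin_step nums hlt, min_comm]
        rw [ih _ _ _ hli' hmx' hmn']
        have hcost : pvCost nums i (l+1) ≤ k := by
          unfold pvCost; push_cast at hc ⊢; omega
        have hj : pvJmin nums k i ≤ l + 1 := (pvValid_iff nums k hli).mp hcost
        have hj' : ((pvJmin nums k i : Nat) : Int) ≤ (l:Int) + 1 := by exact_mod_cast hj
        by_cases hJ : pvJmin nums k i ≤ l
        · have hJ' : ((pvJmin nums k i : Nat) : Int) ≤ (l:Int) := by exact_mod_cast hJ
          rw [max_eq_right (by push_cast; omega), max_eq_right (by omega)]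
          push_cast
          omega
        · have hJ' : ((pvJmin nums k i : Nat) : Int) = (l:Int) + 1 := by exact_mod_cast (by omega : pvJmin nums k i = l + 1)
          rw [max_eq_right (by push_cast; omega)]
          rw [hJ']
          norm_num

theorem pvAlt_sum (nums : List Int) (k : Int) :
    sliding_window_max_min_alt nums k =
      ∑ t ∈ Finset.range nums.length, ((t : Int) - (pvJmin nums k t : Int) + 1) := by
  have key : ∀ (m : Nat) (res0 : Int),
      (List.range m).foldl (fun res i => pvAltGo nums k i i (nums.getD i 0) (nums.getD i 0) res) res0
        = res0 + ∑ t ∈ Finset.range m, ((t : Int) - (pvJmin nums k t : Int) + 1) := by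
    intro m
    induction m with
    | zero => intro res0; simp
    | succ m ihm =>
        intro res0
        rw [List.range_succ, List.foldl_append, ihm, List.foldl_cons, List.foldl_nil]
        rw [pvAltGo_eq nums k m m _ _ _ (le_refl m)
          (by rw [max_self, pvWMax_last]) (by rw [min_self, pvWMin_last])]
        rw [Finset.sum_range_succ]
        have hj1 : pvJmin nums k m ≤ m + 1 := pvJmin_le nums k m
        have hj1' : ((pvJmin nums k m : Nat) : Int) ≤ (m:Int) + 1 := by exact_mod_cast hj1
        rw [max_eq_right (by omega)]
        ring
  unfold sliding_window_max_min_alt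
  rw [key nums.length 0, zero_add]

----------------------------------------------------------------
-- A: deque invariants
----------------------------------------------------------------

theorem pvDMin_mem (nums : List Int) (i : Nat) :
    ∀ (q : List (Int × Nat)) (b : Nat), pvDMin nums i b q →
      ∀ e ∈ q, b ≤ e.2 ∧ e.2 ≤ i ∧ e.1 = nums.getD e.2 0 := by
  intro q
  induction q with
  | nil => intro b _ e he; cases he
  | cons hd rest ih =>
      obtain ⟨v, p⟩ := hd
      intro b hq e he
      obtain ⟨hbp, hpi, hv, hw, hrest⟩ := hq
      rcases List.mem_cons.mp he with he | he
      · subst he; exact ⟨hbp, hpi, hv⟩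
      · obtain ⟨h1, h2, h3⟩ := ih (p+1) hrest e he
        exact ⟨by omega, h2, h3⟩

theorem pvDMin_ge (nums : List Int) (i : Nat) :
    ∀ (q : List (Int × Nat)) (b : Nat), pvDMin nums i b q →
      ∀ e ∈ q, pvWMin nums b i ≤ e.1 := by
  intro q
  induction q with
  | nil => intro b _ e he; cases he
  | cons hd rest ih =>
      obtain ⟨v, p⟩ := hd
      intro b hq e he
      obtain ⟨hbp, hpi, hv, hw, hrest⟩ := hq
      rcases List.mem_cons.mp he with he | he
      · subst he; exact le_of_eq hw.symm
      · have h1 := ih (p+1) hrest e he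
        have h2 := pvDMin_mem nums i rest (p+1) hrest e he
        have hmono : pvWMin nums b i ≤ pvWMin nums (p+1) i :=
          pvWMin_mono nums (by omega) (by omega)
        exact le_trans hmono h1

theorem pvDMax_mem (nums : List Int) (i : Nat) :
    ∀ (q : List (Int × Nat)) (b : Nat), pvDMax nums i b q →
      ∀ e ∈ q, b ≤ e.2 ∧ e.2 ≤ i ∧ e.1 = nums.getD e.2 0 := by
  intro q
  induction q with
  | nil => intro b _ e he; cases he
  | cons hd rest ih =>
      obtain ⟨v, p⟩ := hd
      intro b hq e he
      obtain ⟨hbp, hpi, hv, hw, hrest⟩ := hq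
      rcases List.mem_cons.mp he with he | he
      · subst he; exact ⟨hbp, hpi, hv⟩
      · obtain ⟨h1, h2, h3⟩ := ih (p+1) hrest e he
        exact ⟨by omega, h2, h3⟩

theorem pvDMax_le (nums : List Int) (i : Nat) :
    ∀ (q : List (Int × Nat)) (b : Nat), pvDMax nums i b q →
      ∀ e ∈ q, e.1 ≤ pvWMax nums b i := by
  intro q
  induction q with
  | nil => intro b _ e he; cases he
  | cons hd rest ih =>
      obtain ⟨v, p⟩ := hd
      intro b hq e he
      obtain ⟨hbp, hpi, hv, hw, hrest⟩ := hq
      rcases List.mem_cons.mp he with he | he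
      · subst he; exact le_of_eq hw
      · have h1 := ih (p+1) hrest e he
        have h2 := pvDMax_mem nums i rest (p+1) hrest e he
        have hmono : pvWMax nums (p+1) i ≤ pvWMax nums b i :=
          pvWMax_mono nums (by omega) (by omega)
        exact le_trans h1 hmono

-- the `while ... pop()` back-pop loop, written as reverse/dropWhile, one cons step
theorem pvBackPop_cons {α : Type} (P : α → Bool) (e : α) (rest : List α) :
    ((e :: rest).reverse.dropWhile P).reverse =
      if ((rest.reverse.dropWhile P).reverse).isEmpty then (if P e then [] else [e])
      else e :: (rest.reverse.dropWhile P).reverse := by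
  rw [List.reverse_cons, List.dropWhile_append]
  by_cases hE : rest.reverse.dropWhile P = []
  · simp only [hE, List.isEmpty_nil, List.reverse_nil, if_true, List.dropWhile_cons,
      List.dropWhile_nil]
    by_cases hP : P e
    · simp [hP]
    · simp [hP]
  · have h1 : (rest.reverse.dropWhile P).isEmpty = false := by
      simpa [List.isEmpty_iff] using hE
    have h2 : ((rest.reverse.dropWhile P).reverse).isEmpty = false := by
      simp [List.isEmpty_iff, hE]
    simp only [h1, h2, Bool.false_eq_true, if_false, List.reverse_append,
      List.reverse_reverse]
    simp

-- the first surviving element of a dropWhile fails the predicate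
theorem pvDropWhile_head {α : Type} (P : α → Bool) :
    ∀ (l : List α) (a : α), (l.dropWhile P).head? = some a → P a = false := by
  intro l
  induction l with
  | nil => intro a h; simp at h
  | cons b t ih =>
      intro a h
      by_cases hP : P b
      · rw [List.dropWhile_cons, if_pos hP] at h
        exact ih a h
      · rw [List.dropWhile_cons, if_neg hP] at h
        rw [List.head?_cons, Option.some_inj] at h
        subst h
        simpa using hP

theorem pvPushMin_ok (nums : List Int) (i : Nat) :
    ∀ (q : List (Int × Nat)) (b : Nat), pvDMin nums i b q →
      pvDMin nums (i+1) b
        ((q.reverse.dropWhile (fun e => nums.getD (i+1) 0 ≤ e.1)).reverse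
          ++ [(nums.getD (i+1) 0, i+1)]) := by
  intro q
  induction q with
  | nil =>
      intro b hb
      have hb' : b = i + 1 := hb
      subst hb'
      simp only [List.reverse_nil, List.dropWhile_nil, List.nil_append]
      exact ⟨le_refl _, le_refl _, rfl, (pvWMin_last nums (i+1)).symm, rfl⟩
  | cons hd rest ih =>
      obtain ⟨v, p⟩ := hd
      intro b hb
      obtain ⟨hbp, hpi, hv, hw, hrest⟩ := hb
      rw [pvBackPop_cons]
      have IH := ih (p+1) hrest
      by_cases hg : ((rest.reverse.dropWhile (fun e => decide (nums.getD (i+1) 0 ≤ e.1))).reverse).isEmpty = true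
      · have hge : rest.reverse.dropWhile (fun e => decide (nums.getD (i+1) 0 ≤ e.1)) = [] := by
          simpa [List.isEmpty_iff, List.reverse_eq_nil_iff] using hg
        rw [if_pos hg]
        rw [hge, List.reverse_nil, List.nil_append] at IH
        obtain ⟨h1, h2, h3, h4, h5⟩ := IH
        by_cases hPe : decide (nums.getD (i+1) 0 ≤ v) = true
        · rw [if_pos hPe]
          have hxv : nums.getD (i+1) 0 ≤ v := of_decide_eq_true hPe
          simp only [List.nil_append]
          refine ⟨by omega, le_refl _, rfl, ?_, rfl⟩
          rw [pvWMin_snoc nums (by omega : b ≤ i), ← hw]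
          exact (min_eq_right hxv).symm
        · rw [if_neg hPe]
          have hxv : ¬ nums.getD (i+1) 0 ≤ v := by simpa using hPe
          simp only [List.cons_append, List.nil_append]
          refine ⟨hbp, by omega, hv, ?_, h1, h2, h3, h4, h5⟩
          rw [pvWMin_snoc nums (by omega : b ≤ i), ← hw]
          exact (min_eq_left (by omega)).symm
      · rw [if_neg hg]
        have hgne : rest.reverse.dropWhile (fun e => decide (nums.getD (i+1) 0 ≤ e.1)) ≠ [] := by
          intro h0; rw [h0] at hg; simp at hg
        obtain ⟨e0, he0⟩ := List.exists_mem_of_ne_nil _ hgne |>.imp (fun a ha => ha)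
        -- use the head of the dropWhile result
        have hh : (rest.reverse.dropWhile (fun e => decide (nums.getD (i+1) 0 ≤ e.1))).head? =
            some ((rest.reverse.dropWhile (fun e => decide (nums.getD (i+1) 0 ≤ e.1))).head hgne) :=
          List.head?_eq_head hgne
        set d0 := (rest.reverse.dropWhile (fun e => decide (nums.getD (i+1) 0 ≤ e.1))).head hgne with hd0
        have hPd : (fun e => decide (nums.getD (i+1) 0 ≤ (e : Int × Nat).1)) d0 = false :=
          pvDropWhile_head _ rest.reverse d0 hh
        have hxe : ¬ nums.getD (i+1) 0 ≤ d0.1 := by simpa using hPd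
        have hd0mem : d0 ∈ rest := by
          have h1 : d0 ∈ rest.reverse.dropWhile (fun e => decide (nums.getD (i+1) 0 ≤ e.1)) :=
            List.head_mem hgne
          exact List.mem_reverse.mp ((List.dropWhile_sublist _).subset h1)
        have hb1 := pvDMin_mem nums i rest (p+1) hrest d0 hd0mem
        have hb2 := pvDMin_ge nums i rest (p+1) hrest d0 hd0mem
        have hbv : pvWMin nums b i ≤ pvWMin nums (p+1) i :=
          pvWMin_mono nums (by omega) (by omega)
        rw [List.cons_append]
        refine ⟨hbp, by omega, hv, ?_, IH⟩
        rw [pvWMin_snoc nums (by omega : b ≤ i), ← hw]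
        exact (min_eq_left (by omega)).symm

theorem pvPushMax_ok (nums : List Int) (i : Nat) :
    ∀ (q : List (Int × Nat)) (b : Nat), pvDMax nums i b q →
      pvDMax nums (i+1) b
        ((q.reverse.dropWhile (fun e => e.1 ≤ nums.getD (i+1) 0)).reverse
          ++ [(nums.getD (i+1) 0, i+1)]) := by
  intro q
  induction q with
  | nil =>
      intro b hb
      have hb' : b = i + 1 := hb
      subst hb'
      simp only [List.reverse_nil, List.dropWhile_nil, List.nil_append]
      exact ⟨le_refl _, le_refl _, rfl, (pvWMax_last nums (i+1)).symm, rfl⟩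
  | cons hd rest ih =>
      obtain ⟨v, p⟩ := hd
      intro b hb
      obtain ⟨hbp, hpi, hv, hw, hrest⟩ := hb
      rw [pvBackPop_cons]
      have IH := ih (p+1) hrest
      by_cases hg : ((rest.reverse.dropWhile (fun e => decide (e.1 ≤ nums.getD (i+1) 0))).reverse).isEmpty = true
      · have hge : rest.reverse.dropWhile (fun e => decide (e.1 ≤ nums.getD (i+1) 0)) = [] := by
          simpa [List.isEmpty_iff, List.reverse_eq_nil_iff] using hg
        rw [if_pos hg]
        rw [hge, List.reverse_nil, List.nil_append] at IH
        obtain ⟨h1, h2, h3, h4, h5⟩ := IH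
        by_cases hPe : decide (v ≤ nums.getD (i+1) 0) = true
        · rw [if_pos hPe]
          have hxv : v ≤ nums.getD (i+1) 0 := of_decide_eq_true hPe
          simp only [List.nil_append]
          refine ⟨by omega, le_refl _, rfl, ?_, rfl⟩
          rw [pvWMax_snoc nums (by omega : b ≤ i), ← hw]
          exact (max_eq_right hxv).symm
        · rw [if_neg hPe]
          have hxv : ¬ v ≤ nums.getD (i+1) 0 := by simpa using hPe
          simp only [List.cons_append, List.nil_append]
          refine ⟨hbp, by omega, hv, ?_, h1, h2, h3, h4, h5⟩
          rw [pvWMax_snoc nums (by omega : b ≤ i), ← hw]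
          exact (max_eq_left (by omega)).symm
      · rw [if_neg hg]
        have hgne : rest.reverse.dropWhile (fun e => decide (e.1 ≤ nums.getD (i+1) 0)) ≠ [] := by
          intro h0; rw [h0] at hg; simp at hg
        have hh : (rest.reverse.dropWhile (fun e => decide (e.1 ≤ nums.getD (i+1) 0))).head? =
            some ((rest.reverse.dropWhile (fun e => decide (e.1 ≤ nums.getD (i+1) 0))).head hgne) :=
          List.head?_eq_head hgne
        set d0 := (rest.reverse.dropWhile (fun e => decide (e.1 ≤ nums.getD (i+1) 0))).head hgne with hd0
        have hPd : (fun e => decide ((e : Int × Nat).1 ≤ nums.getD (i+1) 0)) d0 = false :=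
          pvDropWhile_head _ rest.reverse d0 hh
        have hxe : ¬ d0.1 ≤ nums.getD (i+1) 0 := by simpa using hPd
        have hd0mem : d0 ∈ rest := by
          have h1 : d0 ∈ rest.reverse.dropWhile (fun e => decide (e.1 ≤ nums.getD (i+1) 0)) :=
            List.head_mem hgne
          exact List.mem_reverse.mp ((List.dropWhile_sublist _).subset h1)
        have hb1 := pvDMax_mem nums i rest (p+1) hrest d0 hd0mem
        have hb2 := pvDMax_le nums i rest (p+1) hrest d0 hd0mem
        have hbv : pvWMax nums (p+1) i ≤ pvWMax nums b i :=
          pvWMax_mono nums (by omega) (by omega)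
        rw [List.cons_append]
        refine ⟨hbp, by omega, hv, ?_, IH⟩
        rw [pvWMax_snoc nums (by omega : b ≤ i), ← hw]
        exact (max_eq_left (by omega)).symm

theorem pvDMin_head (nums : List Int) {i j : Nat} {q : List (Int × Nat)}
    (hq : pvDMin nums i j q) (hji : j ≤ i) :
    (q.headD (0,0)).1 = pvWMin nums j i := by
  cases q with
  | nil => have : j = i + 1 := hq; omega
  | cons hd rest =>
      obtain ⟨v, p⟩ := hd
      obtain ⟨_, _, _, hw, _⟩ := hq
      simpa using hw

theorem pvDMax_head (nums : List Int) {i j : Nat} {q : List (Int × Nat)}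
    (hq : pvDMax nums i j q) (hji : j ≤ i) :
    (q.headD (0,0)).1 = pvWMax nums j i := by
  cases q with
  | nil => have : j = i + 1 := hq; omega
  | cons hd rest =>
      obtain ⟨v, p⟩ := hd
      obtain ⟨_, _, _, hw, _⟩ := hq
      simpa using hw

theorem pvDMin_popleft (nums : List Int) {i j : Nat} {q : List (Int × Nat)}
    (hq : pvDMin nums i j q) (hji : j ≤ i) :
    pvDMin nums i (j+1) (if (q.headD (0,0)).2 = j then q.tail else q) := by
  cases q with
  | nil => have : j = i + 1 := hq; omega
  | cons hd rest =>
      obtain ⟨v, p⟩ := hd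
      obtain ⟨hbp, hpi, hv, hw, hrest⟩ := hq
      simp only [List.headD_cons, List.tail_cons]
      by_cases hpj : p = j
      · rw [if_pos hpj]
        subst hpj
        exact hrest
      · rw [if_neg hpj]
        have hjp : j + 1 ≤ p := by omega
        have hji' : j + 1 ≤ i := by omega
        refine ⟨hjp, hpi, hv, ?_, hrest⟩
        have h1 : pvWMin nums (j+1) i ≤ nums.getD p 0 := pvWMin_le_get nums hjp hpi
        have h2 : pvWMin nums j i ≤ pvWMin nums (j+1) i :=
          pvWMin_mono nums (by omega) hji'
        omega

theorem pvDMax_popleft (nums : List Int) {i j : Nat} {q : List (Int × Nat)}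
    (hq : pvDMax nums i j q) (hji : j ≤ i) :
    pvDMax nums i (j+1) (if (q.headD (0,0)).2 = j then q.tail else q) := by
  cases q with
  | nil => have : j = i + 1 := hq; omega
  | cons hd rest =>
      obtain ⟨v, p⟩ := hd
      obtain ⟨hbp, hpi, hv, hw, hrest⟩ := hq
      simp only [List.headD_cons, List.tail_cons]
      by_cases hpj : p = j
      · rw [if_pos hpj]
        subst hpj
        exact hrest
      · rw [if_neg hpj]
        have hjp : j + 1 ≤ p := by omega
        have hji' : j + 1 ≤ i := by omega
        refine ⟨hjp, hpi, hv, ?_, hrest⟩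
        have h1 : nums.getD p 0 ≤ pvWMax nums (j+1) i := pvGet_le_wMax nums hjp hpi
        have h2 : pvWMax nums (j+1) i ≤ pvWMax nums j i :=
          pvWMax_mono nums (by omega) hji'
        omega

theorem pvShrink_ok (nums : List Int) (k : Int) (i : Nat) :
    ∀ (fuel j : Nat) (qmin qmax : List (Int × Nat)), i + 1 - j ≤ fuel →
      pvDMin nums i j qmin → pvDMax nums i j qmax → j ≤ pvJmin nums k i →
      (pvShrink k i fuel qmin qmax j).2.2 = pvJmin nums k i ∧
      pvDMin nums i (pvJmin nums k i) (pvShrink k i fuel qmin qmax j).1 ∧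
      pvDMax nums i (pvJmin nums k i) (pvShrink k i fuel qmin qmax j).2.1 := by
  intro fuel
  induction fuel with
  | zero =>
      intro j qmin qmax hd h1 h2 hj
      have hji : ¬ j ≤ i := by omega
      have hjl := pvJmin_le nums k i
      have hEq : j = pvJmin nums k i := by omega
      subst hEq
      exact ⟨rfl, h1, h2⟩
  | succ d ihd =>
      intro j qmin qmax hd h1 h2 hj
      rw [pvShrink]
      by_cases hcond : j ≤ i ∧
          k < ((qmax.headD (0,0)).1 - (qmin.headD (0,0)).1) * ((i:Int) - (j:Int) + 1)
      · rw [if_pos hcond]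
        obtain ⟨hji, hk⟩ := hcond
        rw [pvDMax_head nums h2 hji, pvDMin_head nums h1 hji] at hk
        have hcost : k < pvCost nums i j := by unfold pvCost; exact hk
        have hjlt : j < pvJmin nums k i := by
          by_contra hcc
          push_neg at hcc
          exact absurd ((pvValid_iff nums k hji).mpr hcc) (not_le.mpr hcost)
        exact ihd (j+1) _ _ (by omega) (pvDMin_popleft nums h1 hji)
          (pvDMax_popleft nums h2 hji) (by omega)
      · rw [if_neg hcond]
        have hjl := pvJmin_le nums k i
        have hEq : j = pvJmin nums k i := by
          by_cases hji : j ≤ i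
          · have hk : ¬ k < ((qmax.headD (0,0)).1 - (qmin.headD (0,0)).1) *
                ((i:Int) - (j:Int) + 1) := fun hk => hcond ⟨hji, hk⟩
            rw [pvDMax_head nums h2 hji, pvDMin_head nums h1 hji] at hk
            have hcost : pvCost nums i j ≤ k := by unfold pvCost; omega
            have := (pvValid_iff nums k hji).mp hcost
            omega
          · omega
        subst hEq
        exact ⟨rfl, h1, h2⟩

theorem pvStepA_good (nums : List Int) (k : Int) (m : Nat)
    (st : List (Int × Nat) × List (Int × Nat) × Int × Nat)
    (h : pvGoodA nums k m st) : pvGoodA nums k (m+1) (pvStepA nums k st m) := by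
  cases m with
  | zero =>
      have hst : st = ([], [], 0, 0) := h
      subst hst
      simp only [pvStepA, List.reverse_nil, List.dropWhile_nil, List.nil_append]
      have d1 : pvDMin nums 0 0 [(nums.getD 0 0, 0)] :=
        ⟨le_refl _, le_refl _, rfl, (pvWMin_last nums 0).symm, rfl⟩
      have d2 : pvDMax nums 0 0 [(nums.getD 0 0, 0)] :=
        ⟨le_refl _, le_refl _, rfl, (pvWMax_last nums 0).symm, rfl⟩
      have hs := pvShrink_ok nums k 0 (0+1) 0 _ _ (by omega) d1 d2 (Nat.zero_le _)
      refine ⟨?_, ?_, ?_, ?_⟩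
      · rw [hs.1]; exact hs.2.1
      · rw [hs.1]; exact hs.2.2
      · exact hs.1
      · rw [Finset.sum_range_one, hs.1]
        push_cast
        ring
  | succ m' =>
      obtain ⟨hdmin, hdmax, hjeq, hres⟩ := h
      simp only [pvStepA]
      have p1 := pvPushMin_ok nums m' st.1 st.2.2.2 hdmin
      have p2 := pvPushMax_ok nums m' st.2.1 st.2.2.2 hdmax
      have hjle : st.2.2.2 ≤ pvJmin nums k (m'+1) := by
        rw [hjeq]; exact pvJmin_mono nums k m'
      have hs := pvShrink_ok nums k (m'+1) (m'+1+1) st.2.2.2 _ _ (by omega) p1 p2 hjle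
      refine ⟨?_, ?_, ?_, ?_⟩
      · rw [hs.1]; exact hs.2.1
      · rw [hs.1]; exact hs.2.2
      · exact hs.1
      · rw [Finset.sum_range_succ, ← hres, hs.1]

theorem pvFoldA_good (nums : List Int) (k : Int) (m : Nat) :
    pvGoodA nums k m ((List.range m).foldl (pvStepA nums k) ([], [], 0, 0)) := by
  induction m with
  | zero => rfl
  | succ m ih =>
      rw [List.range_succ, List.foldl_append, List.foldl_cons, List.foldl_nil]
      exact pvStepA_good nums k m _ ih

-- ===== VERDICT (by name: the statement is the Claim_ definition above) =====
theorem sliding_window_max_min_spec : Claim_equal_sliding_window_max_min := by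
  unfold Claim_equal_sliding_window_max_min
  intro nums k _
  unfold Spec_sliding_window_max_min
  rw [pvAlt_sum]
  unfold sliding_window_max_min
  cases hn : nums.length with
  | zero => simp
  | succ m' =>
      have hg := pvFoldA_good nums k (m'+1)
      exact hg.2.2.2
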